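-- pv_equiv track=rewrite | github.com/hexycat/advent-of-code | 2022/python/06/main.py | part_one
-- ===== SOURCE A (Python) =====
-- def get_subroutine_start(subroutine: str) -> int:
--     """Returns start index of new start-of-packet inside subroutine
--     If index is 0, then entire subroutine is packet"""
--     start = 0
--     for i in range(len(subroutine) - 1, -1, -1):
--         for j in range(i):
--             if subroutine[i] == subroutine[j]:
--                 start = max(start, j + 1)
--     return start
--
-- def part_one(buffer: str) -> int:
--     """Returns number of processed elements at moment
--     of occurrence start-of-packet"""
--     SUBROUTINE_LENGTH = 4
--     start = 0
--     while True:
--         subroutine = buffer[start : start + SUBROUTINE_LENGTH]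
--         step = get_subroutine_start(subroutine)
--         if step == 0:
--             return start + SUBROUTINE_LENGTH
--         start += step
-- ===== SOURCE B (Python) =====
-- def part_one(buffer: str) -> int:
--     start = 0
--     while True:
--         w = buffer[start : start + 4]
--         if len(set(w)) == len(w):
--             return start + 4
--         start += 1
-- ===== Notes on version B (the rewrite author's own statement) =====
-- stated objective: simpler
-- what changed: Single self-contained sliding-window loop that tests distinctness of each 4-char slice with a set and advances one position at a time, replacing the helper that scans all index pairs of the window to compute a multi-position skip.
import Mathlib
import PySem

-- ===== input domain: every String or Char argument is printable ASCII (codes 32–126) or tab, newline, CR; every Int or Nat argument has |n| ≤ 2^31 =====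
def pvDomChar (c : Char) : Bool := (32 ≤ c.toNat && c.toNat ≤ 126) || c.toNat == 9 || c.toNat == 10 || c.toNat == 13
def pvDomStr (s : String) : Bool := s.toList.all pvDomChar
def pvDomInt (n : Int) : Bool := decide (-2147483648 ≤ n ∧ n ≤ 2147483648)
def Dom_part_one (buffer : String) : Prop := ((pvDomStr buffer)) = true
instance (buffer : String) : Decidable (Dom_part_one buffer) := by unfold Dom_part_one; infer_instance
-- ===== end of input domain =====

-- B replaces A's pairwise-duplicate helper and multi-position skip by a plain
-- one-step sliding window whose slice is tested for distinctness with a set (simpler).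

-- ===== PORT A =====
-- get_subroutine_start: nested for-loops over range(len-1,-1,-1) and range(i);
-- subroutine[i]/[j] are always in range there, so getD is exact.
def gss (cs : List Char) : Nat :=
  ((List.range cs.length).reverse).foldl
    (fun start i =>
      (List.range i).foldl
        (fun start j => if cs.getD i ' ' = cs.getD j ' ' then max start (j + 1) else start)
        start)
    0

-- termination facts for A's while-loop (cited by decreasing_by)
theorem gss_len_le_one (cs : List Char) (h : cs.length ≤ 1) : gss cs = 0 := by
  match cs, h with
  | [], _ => rfl
  | [a], _ => simp [gss]

theorem gss_ne_zero_window {l : List Char} {start : Nat}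
    (h : gss ((l.drop start).take 4) ≠ 0) : start < l.length := by
  by_contra hc
  exact h (gss_len_le_one _ (by simp; omega))

-- part_one: while True over start; buffer[start:start+4] = (l.drop start).take 4
-- (PySem.List.slice_natCast_add)
def partOneLoop (l : List Char) (start : Nat) : Int :=
  let sub := (l.drop start).take 4
  if h : gss sub = 0 then (start : Int) + 4
  else partOneLoop l (start + gss sub)
termination_by l.length - start
decreasing_by
  have h1 : start < l.length := gss_ne_zero_window h
  have h2 : 1 ≤ gss ((l.drop start).take 4) := Nat.one_le_iff_ne_zero.mpr h
  omega

def part_one (buffer : String) : Int := partOneLoop buffer.toList 0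

-- ===== PORT B =====
-- termination fact for B's loop (cited by decreasing_by)
theorem set_len_ne_window {l : List Char} {start : Nat}
    (h : ¬ (PySem.Set.ofList ((l.drop start).take 4)).length = ((l.drop start).take 4).length) :
    start < l.length := by
  by_contra hc
  have hnil : (l.drop start).take 4 = [] := by
    have : l.length ≤ start := by omega
    simp [List.drop_eq_nil_of_le this]
  rw [hnil] at h
  exact h rfl

-- while True over start; window distinct iff len(set(w)) == len(w)
def partOneAltLoop (l : List Char) (start : Nat) : Int :=
  let w := (l.drop start).take 4
  if h : (PySem.Set.ofList w).length = w.length then (start : Int) + 4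
  else partOneAltLoop l (start + 1)
termination_by l.length - start
decreasing_by
  have h1 : start < l.length := set_len_ne_window h
  omega

def part_one_alt (buffer : String) : Int := partOneAltLoop buffer.toList 0

-- ===== PRECONDITION & SPEC =====
def Spec_part_one (buffer : String) (out : Int) : Prop := out = part_one_alt buffer
instance (buffer : String) (out : Int) : Decidable (Spec_part_one buffer out) := by unfold Spec_part_one; infer_instance

-- ===== CLAIM (what is proved, stated in full; the proofs are below) =====
def Claim_equal_part_one : Prop := ∀ (buffer : String), Dom_part_one buffer → Spec_part_one buffer (part_one buffer)

-- ===== LEMMAS AND PROOFS =====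

-- the step function and flattened pair list that characterise gss
def pvStep (cs : List Char) (s : Nat) (p : Nat × Nat) : Nat :=
  if cs.getD p.1 ' ' = cs.getD p.2 ' ' then max s (p.2 + 1) else s

def pvPairs (n : Nat) : List (Nat × Nat) :=
  ((List.range n).reverse).flatMap (fun i => (List.range i).map (fun j => (i, j)))

theorem pv_le_foldl (cs : List Char) : ∀ (ps : List (Nat × Nat)) (acc : Nat),
    acc ≤ List.foldl (pvStep cs) acc ps := by
  intro ps
  induction ps with
  | nil => intro acc; simp
  | cons p ps ih =>
    intro acc
    simp only [List.foldl_cons]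
    refine le_trans ?_ (ih (pvStep cs acc p))
    unfold pvStep
    split
    · exact Nat.le_max_left _ _
    · exact le_rfl

theorem pv_foldl_ge (cs : List Char) : ∀ (ps : List (Nat × Nat)) (acc : Nat) (p : Nat × Nat),
    p ∈ ps → cs.getD p.1 ' ' = cs.getD p.2 ' ' → p.2 + 1 ≤ List.foldl (pvStep cs) acc ps := by
  intro ps
  induction ps with
  | nil => intro acc p hp; exact absurd hp (List.not_mem_nil)
  | cons q ps ih =>
    intro acc p hp hc
    simp only [List.foldl_cons]
    rcases List.mem_cons.1 hp with h | h
    · subst h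
      refine le_trans ?_ (pv_le_foldl cs ps (pvStep cs acc p))
      unfold pvStep
      rw [if_pos hc]
      exact Nat.le_max_right _ _
    · exact ih (pvStep cs acc q) p h hc

theorem pv_foldl_cases (cs : List Char) : ∀ (ps : List (Nat × Nat)) (acc : Nat),
    List.foldl (pvStep cs) acc ps = acc ∨
      ∃ p ∈ ps, cs.getD p.1 ' ' = cs.getD p.2 ' ' ∧ List.foldl (pvStep cs) acc ps = p.2 + 1 := by
  intro ps
  induction ps with
  | nil => intro acc; left; rfl
  | cons q ps ih =>
    intro acc
    simp only [List.foldl_cons]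
    rcases ih (pvStep cs acc q) with h | ⟨p, hp, hc, he⟩
    · by_cases hc : cs.getD q.1 ' ' = cs.getD q.2 ' '
      · have hs : pvStep cs acc q = max acc (q.2 + 1) := by unfold pvStep; rw [if_pos hc]
        rcases Nat.le_total acc (q.2 + 1) with hle | hle
        · right
          exact ⟨q, List.mem_cons_self, hc, by rw [h, hs, Nat.max_eq_right hle]⟩
        · left
          rw [h, hs, Nat.max_eq_left hle]
      · have hs : pvStep cs acc q = acc := by unfold pvStep; rw [if_neg hc]
        left
        rw [h, hs]
    · right; exact ⟨p, List.mem_cons_of_mem _ hp, hc, he⟩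

theorem gss_eq (cs : List Char) : gss cs = List.foldl (pvStep cs) 0 (pvPairs cs.length) := by
  unfold gss pvPairs pvStep
  rw [List.foldl_flatMap]
  simp [List.foldl_map]

theorem mem_pvPairs {n i j : Nat} : (i, j) ∈ pvPairs n ↔ j < i ∧ i < n := by
  simp only [pvPairs, List.mem_flatMap, List.mem_map, List.mem_reverse, List.mem_range,
    Prod.mk.injEq]
  constructor
  · rintro ⟨a, ha, b, hb, h1, h2⟩
    subst h1; subst h2
    exact ⟨hb, ha⟩
  · rintro ⟨h1, h2⟩
    exact ⟨i, h2, j, h1, rfl, rfl⟩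

theorem gss_zero_nodup {cs : List Char} (h : gss cs = 0) : cs.Nodup := by
  rw [List.nodup_iff_getElem?_ne_getElem?]
  intro a b hab hb heq
  have hc : cs.getD b ' ' = cs.getD a ' ' := by
    rw [List.getD_eq_getElem?_getD, List.getD_eq_getElem?_getD, heq]
  have := pv_foldl_ge cs (pvPairs cs.length) 0 (b, a)
    (mem_pvPairs.mpr ⟨hab, hb⟩) hc
  rw [← gss_eq, h] at this
  omega

theorem gss_pos_dup {cs : List Char} (h : gss cs ≠ 0) :
    ∃ i, gss cs - 1 < i ∧ i < cs.length ∧ cs[i]? = cs[gss cs - 1]? := by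
  rcases pv_foldl_cases cs (pvPairs cs.length) 0 with h0 | ⟨p, hp, hc, he⟩
  · rw [gss_eq] at h; exact absurd h0 h
  · obtain ⟨i, j⟩ := p
    obtain ⟨hji, hin⟩ := mem_pvPairs.mp hp
    have hg : gss cs = j + 1 := by rw [gss_eq]; exact he
    have hjn : j < cs.length := lt_trans hji hin
    refine ⟨i, by omega, hin, ?_⟩
    rw [List.getD_eq_getElem?_getD, List.getD_eq_getElem?_getD,
      List.getElem?_eq_getElem hin, List.getElem?_eq_getElem hjn] at hc
    simp only [Option.getD_some] at hc
    have : gss cs - 1 = j := by omega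
    rw [this, List.getElem?_eq_getElem hin, List.getElem?_eq_getElem hjn, hc]

theorem win_getElem? (l : List Char) (s t : Nat) (h4 : t < 4) :
    ((l.drop s).take 4)[t]? = l[s + t]? := by
  rw [List.getElem?_take, if_pos h4, List.getElem?_drop]

theorem window_dup (l : List Char) (start : Nat) :
    ∀ k, k < gss ((l.drop start).take 4) → ¬ ((l.drop (start + k)).take 4).Nodup := by
  intro k hk hn
  have hne : gss ((l.drop start).take 4) ≠ 0 := by omega
  obtain ⟨i, hji, hilen, heq⟩ := gss_pos_dup hne
  have hlen : ((l.drop start).take 4).length = min 4 (l.length - start) := by simp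
  have hk' : k ≤ gss ((l.drop start).take 4) - 1 := by omega
  have hi4 : i < 4 := by omega
  have hil : start + i < l.length := by omega
  have e1 : ((l.drop start).take 4)[i]? = l[start + i]? := win_getElem? l start i hi4
  have e2 : ((l.drop start).take 4)[gss ((l.drop start).take 4) - 1]?
      = l[start + (gss ((l.drop start).take 4) - 1)]? := win_getElem? l start _ (by omega)
  have hw : ((l.drop (start + k)).take 4)[i - k]? = l[start + i]? := by
    rw [win_getElem? l (start + k) (i - k) (by omega)]
    congr 1
    omega
  have hw2 : ((l.drop (start + k)).take 4)[gss ((l.drop start).take 4) - 1 - k]?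
      = l[start + (gss ((l.drop start).take 4) - 1)]? := by
    rw [win_getElem? l (start + k) _ (by omega)]
    congr 1
    omega
  have hlen' : ((l.drop (start + k)).take 4).length = min 4 (l.length - (start + k)) := by simp
  rw [List.nodup_iff_getElem?_ne_getElem?] at hn
  exact hn (gss ((l.drop start).take 4) - 1 - k) (i - k) (by omega) (by rw [hlen']; omega)
    (by rw [hw2, hw, ← e1, ← e2, heq])

-- set(w) has as many elements as w iff w has no duplicates
theorem foldl_add_sublist (xs : List Char) : ∀ s : List Char,
    List.Sublist (xs.foldl PySem.Set.add s) (s ++ xs) := by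
  induction xs with
  | nil => intro s; simp
  | cons x xs ih =>
    intro s
    simp only [List.foldl_cons]
    refine List.Sublist.trans (ih (PySem.Set.add s x)) ?_
    have h2 : List.Sublist (PySem.Set.add s x ++ xs) ((s ++ [x]) ++ xs) := by
      rw [PySem.Set.add_eq_ite]
      split
      · exact List.Sublist.append_right (List.sublist_append_left s [x]) xs
      · exact List.Sublist.refl _
    simpa using h2

theorem ofList_sublist (xs : List Char) : List.Sublist (PySem.Set.ofList xs) xs := by
  simpa using foldl_add_sublist xs []

theorem setlen_iff (xs : List Char) : (PySem.Set.ofList xs).length = xs.length ↔ xs.Nodup := by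
  constructor
  · intro h
    have he := (ofList_sublist xs).eq_of_length h
    rw [← he]
    exact PySem.Set.nodup_ofList xs
  · intro h
    rw [PySem.Set.ofList_eq_self_of_nodup xs h]

theorem alt_step (l : List Char) (start : Nat) (h : ¬ ((l.drop start).take 4).Nodup) :
    partOneAltLoop l start = partOneAltLoop l (start + 1) := by
  rw [partOneAltLoop]
  rw [dif_neg (fun hc => h ((setlen_iff _).mp hc))]

theorem alt_shift (l : List Char) : ∀ (m start : Nat),
    (∀ k, k < m → ¬ ((l.drop (start + k)).take 4).Nodup) →
    partOneAltLoop l (start + m) = partOneAltLoop l start := by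
  intro m
  induction m with
  | zero => intro start _; rfl
  | succ m ih =>
    intro start h
    have h0 : ¬ ((l.drop start).take 4).Nodup := by simpa using h 0 (Nat.succ_pos m)
    rw [alt_step l start h0]
    have e : start + (m + 1) = (start + 1) + m := by omega
    rw [e]
    refine ih (start + 1) (fun k hk => ?_)
    have h' := h (k + 1) (by omega)
    have e2 : start + 1 + k = start + (k + 1) := by omega
    rw [e2]
    exact h'

theorem loops_eq (d : Nat) (l : List Char) : ∀ start, l.length - start ≤ d →
    partOneLoop l start = partOneAltLoop l start := by
  induction d with
  | zero =>
    intro start hd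
    rw [partOneLoop]
    by_cases h : gss ((l.drop start).take 4) = 0
    · rw [dif_pos h, partOneAltLoop,
        dif_pos ((setlen_iff _).mpr (gss_zero_nodup h))]
    · exact absurd (gss_ne_zero_window h) (by omega)
  | succ d ih =>
    intro start hd
    rw [partOneLoop]
    by_cases h : gss ((l.drop start).take 4) = 0
    · rw [dif_pos h, partOneAltLoop,
        dif_pos ((setlen_iff _).mpr (gss_zero_nodup h))]
    · rw [dif_neg h]
      have h1 : start < l.length := gss_ne_zero_window h
      have h2 : 1 ≤ gss ((l.drop start).take 4) := Nat.one_le_iff_ne_zero.mpr h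
      rw [ih (start + gss ((l.drop start).take 4)) (by omega)]
      exact alt_shift l (gss ((l.drop start).take 4)) start (window_dup l start)

-- ===== VERDICT (by name: the statement is the Claim_ definition above) =====
theorem part_one_spec : Claim_equal_part_one := by
  intro buffer _
  unfold Spec_part_one part_one part_one_alt
  exact loops_eq buffer.toList.length buffer.toList 0 (by omega)
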